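-- pv_equiv track=rewrite | github.com/hidegmisi/hungary_2022_gerrymandering | src/hungary_ge/diagnostics/chains.py | split_draw_indices_by_chain
-- ===== SOURCE A (Python) =====
-- def split_draw_indices_by_chain(
--     chain_per_draw: tuple[int, ...],
-- ) -> dict[int, list[int]]:
--     """Map chain id -> sorted draw column indices (0-based)."""
--     out: dict[int, list[int]] = {}
--     for j, ch in enumerate(chain_per_draw):
--         out.setdefault(int(ch), []).append(j)
--     for ch in out:
--         out[ch].sort()
--     return out
-- ===== SOURCE B (Python) =====
-- def split_draw_indices_by_chain(
--     chain_per_draw: tuple[int, ...],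
-- ) -> dict[int, list[int]]:
--     """Map chain id -> sorted draw column indices (0-based)."""
--     keys = list(dict.fromkeys(int(ch) for ch in chain_per_draw))
--     return {k: [j for j, ch in enumerate(chain_per_draw) if int(ch) == k]
--             for k in keys}
-- ===== Notes on version B (the rewrite author's own statement) =====
-- stated objective: alternative
-- what changed: Replaces the single-pass setdefault hash-grouping plus per-key sort with an ordered dedup of the chain ids followed by one filtering comprehension per key; no dict is built incrementally and no sort is needed since enumerate indices are already ascending.
import Mathlib
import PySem

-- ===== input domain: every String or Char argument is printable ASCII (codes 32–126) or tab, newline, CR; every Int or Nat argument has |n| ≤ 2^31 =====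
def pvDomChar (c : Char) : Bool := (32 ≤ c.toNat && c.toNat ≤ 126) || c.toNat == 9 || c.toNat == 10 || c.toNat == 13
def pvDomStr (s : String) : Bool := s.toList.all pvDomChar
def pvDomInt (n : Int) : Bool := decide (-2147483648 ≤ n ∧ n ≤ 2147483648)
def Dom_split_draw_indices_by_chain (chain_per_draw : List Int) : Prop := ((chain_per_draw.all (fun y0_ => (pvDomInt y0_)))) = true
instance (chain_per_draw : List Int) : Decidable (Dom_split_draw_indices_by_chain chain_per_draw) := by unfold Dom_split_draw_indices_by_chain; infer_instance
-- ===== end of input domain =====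

-- B replaces A's single-pass setdefault hash-grouping (plus per-key sort) by an ordered
-- dedup of the chain ids followed by one filtering pass per key (alternative decomposition).


-- ===== PORT A =====
-- out.setdefault(int(ch), []).append(j) is d[ch] = d.get(ch, []) + [j], i.e. Dict.modify
def split_draw_indices_by_chain (chain_per_draw : List Int) : List (Int × List Int) :=
  let d := (PySem.List.enumerate chain_per_draw).foldl
    (fun d p => d.modify p.2 [] (fun v => v ++ [p.1])) PySem.Dict.empty
  -- for ch in out: out[ch].sort()
  let d2 := d.keys.foldl
    (fun d ch => d.modify ch [] (fun v => PySem.List.sorted v (fun x => x) false)) d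
  d2.items

-- ===== PORT B =====
def split_draw_indices_by_chain_alt (chain_per_draw : List Int) : List (Int × List Int) :=
  let keys := PySem.List.dedup chain_per_draw
  keys.map (fun k =>
    (k, ((PySem.List.enumerate chain_per_draw).filter (fun p => p.2 == k)).map (·.1)))

-- ===== PRECONDITION & SPEC =====
def Spec_split_draw_indices_by_chain (chain_per_draw : List Int) (out : List (Int × List Int)) : Prop := out = split_draw_indices_by_chain_alt chain_per_draw
instance (chain_per_draw : List Int) (out : List (Int × List Int)) : Decidable (Spec_split_draw_indices_by_chain chain_per_draw out) := by unfold Spec_split_draw_indices_by_chain; infer_instance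

-- ===== CLAIM (what is proved, stated in full; the proofs are below) =====
def Claim_equal_split_draw_indices_by_chain : Prop := ∀ (chain_per_draw : List Int), Dom_split_draw_indices_by_chain chain_per_draw → Spec_split_draw_indices_by_chain chain_per_draw (split_draw_indices_by_chain chain_per_draw)

-- ===== LEMMAS AND PROOFS =====

-- Folding a modify over a Nodup key list touches each key at most once.
theorem getD_foldl_modify_once (f : List Int → List Int) (ks : List Int)
    (d : PySem.Dict Int (List Int)) (c : Int) (hnd : ks.Nodup) :
    (ks.foldl (fun d k => d.modify k [] f) d).getD c []
      = if c ∈ ks then f (d.getD c []) else d.getD c [] := by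
  induction ks generalizing d with
  | nil => simp
  | cons k ks ih =>
    simp only [List.foldl_cons]
    rw [ih (d.modify k [] f) (by simpa using hnd.of_cons)]
    rcases eq_or_ne c k with rfl | hck
    · have hcn : c ∉ ks := (List.nodup_cons.mp hnd).1
      simp [hcn, PySem.Dict.getD_modify_self]
    · rw [PySem.Dict.getD_modify_of_ne _ _ _ hck]
      simp [hck]

theorem idxs_pairwise (l : List Int) (k : Int) :
    (((PySem.List.enumerate l).filter (fun p => p.2 == k)).map (·.1)).Pairwise
      (fun a b => a ≤ b) := by
  have h := (PySem.List.pairwise_lt_enumerate l 0).filter (fun p => p.2 == k)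
  exact List.Pairwise.map (f := fun p : Int × Int => p.1)
    (S := fun (a b : Int) => a ≤ b) (fun a b hab => le_of_lt hab) h

theorem split_draw_indices_by_chain_eq (l : List Int) :
    split_draw_indices_by_chain l = split_draw_indices_by_chain_alt l := by
  unfold split_draw_indices_by_chain split_draw_indices_by_chain_alt
  simp only []
  set d := (PySem.List.enumerate l).foldl
    (fun d p => d.modify p.2 [] (fun v => v ++ [p.1])) PySem.Dict.empty with hd
  -- keys of d
  have hkeys : d.keys = PySem.List.dedup l := by
    rw [hd]
    have := PySem.Dict.keys_foldl_modify_key (l := PySem.List.enumerate l)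
      (key := fun p => p.2) (d0 := []) (f := fun (d : PySem.Dict Int (List Int)) p v => v ++ [p.1])
      (d := PySem.Dict.empty)
    rw [this]
    simp [PySem.List.map_snd_enumerate, PySem.Dict.keys_empty,
      PySem.Set.update_nil_left]
  have hnd : d.keys.Nodup := by rw [hkeys]; exact PySem.List.nodup_dedup l
  -- values of d
  have hval : ∀ c, d.getD c []
      = ((PySem.List.enumerate l).filter (fun p => p.2 == c)).map (·.1) := by
    intro c
    have h := PySem.Dict.getD_foldl_modify_append
      ((PySem.List.enumerate l).map Prod.swap) PySem.Dict.empty c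
    rw [List.foldl_map] at h
    simpa [List.filter_map, List.map_map, Function.comp_def] using h
  set d2 := d.keys.foldl
    (fun d ch => d.modify ch [] (fun v => PySem.List.sorted v (fun x => x) false)) d with hd2
  have hval2 : ∀ c ∈ d.keys, d2.getD c []
      = ((PySem.List.enumerate l).filter (fun p => p.2 == c)).map (·.1) := by
    intro c hc
    rw [hd2, getD_foldl_modify_once _ _ _ _ hnd, if_pos hc, hval c]
    exact PySem.List.sorted_eq_self_of_pairwise _ _ (idxs_pairwise l c)
  have hkeys2 : d2.keys = d.keys := by
    rw [hd2]
    have := PySem.Dict.keys_foldl_modify_key (l := d.keys) (key := fun k => k)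
      (d0 := []) (f := fun (d : PySem.Dict Int (List Int)) k v => PySem.List.sorted v (fun x => x) false)
      (d := d)
    rw [this, List.map_id', PySem.Set.update_eq_append_filter]
    rw [List.filter_eq_nil_iff.mpr (by
      intro a ha
      rw [(PySem.Set.contains_iff _ _).mpr ((PySem.Set.mem_ofList _ _).mp ha)]
      simp)]
    simp
  have hnd2 : d2.keys.Nodup := by rw [hkeys2]; exact hnd
  rw [PySem.Dict.items_eq_map_keys d2 hnd2 [], hkeys2, hkeys]
  apply List.map_congr_left
  intro k hk
  rw [hval2 k (by rw [hkeys]; exact hk)]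

-- ===== VERDICT (by name: the statement is the Claim_ definition above) =====
theorem split_draw_indices_by_chain_spec : Claim_equal_split_draw_indices_by_chain := by
  intro l _
  unfold Spec_split_draw_indices_by_chain
  exact split_draw_indices_by_chain_eq l
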